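-- pv_equiv track=rewrite | github.com/NicholasLiem/kubescale | src/mltps/plot.py | _find_spikes_adaptive
-- ===== SOURCE A (Python) =====
-- def _find_spikes_adaptive(data, threshold):
--     """Adaptive spike detection with context awareness"""
--     spikes = []
--     min_spike_duration = 1  # Minimum duration for a spike
--     min_gap = 2  # Minimum gap between separate spikes
--
--     i = 0
--     while i < len(data):
--         if data[i] > threshold:
--             spike_start = i
--             # Find the end of the spike
--             while i < len(data) and data[i] > threshold:
--                 i += 1
--             spike_duration = i - spike_start
--
--             # Only consider spikes that meet minimum duration
--             if spike_duration >= min_spike_duration: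
--                 # Check if this is far enough from the last spike
--                 if not spikes or spike_start - spikes[-1] >= min_gap:
--                     spikes.append(spike_start)
--         else:
--             i += 1
--
--     return spikes
-- ===== SOURCE B (Python) =====
-- def _find_spikes_adaptive(data, threshold):
--     """Single flat pass: record index where the series crosses above threshold."""
--     spikes = []
--     prev = False
--     for i, x in enumerate(data):
--         cur = x > threshold
--         if cur and not prev:
--             spikes.append(i)
--         prev = cur
--     return spikes
-- ===== Notes on version B (the rewrite author's own statement) =====
-- stated objective: simpler
-- what changed: Replaced A's nested while-loops with run-skipping and last-spike gap checks by a single flat enumerate pass keeping one boolean prev flag (the duration and gap guards are provably always satisfied).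
import Mathlib
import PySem

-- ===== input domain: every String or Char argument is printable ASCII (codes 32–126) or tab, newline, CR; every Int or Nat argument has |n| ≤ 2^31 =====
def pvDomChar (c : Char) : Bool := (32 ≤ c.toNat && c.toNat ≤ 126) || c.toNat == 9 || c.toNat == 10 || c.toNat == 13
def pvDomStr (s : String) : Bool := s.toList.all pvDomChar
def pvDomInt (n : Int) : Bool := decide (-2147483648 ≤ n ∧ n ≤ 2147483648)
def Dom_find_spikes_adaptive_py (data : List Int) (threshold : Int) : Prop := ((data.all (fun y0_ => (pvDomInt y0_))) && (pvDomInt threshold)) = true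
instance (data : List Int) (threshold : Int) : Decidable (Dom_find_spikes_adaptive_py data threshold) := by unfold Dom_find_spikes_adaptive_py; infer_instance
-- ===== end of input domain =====

-- B replaces A's nested while-loops (run-skipping inner loop, duration and gap guards)
-- by one flat pass with a boolean prev flag; objective: simpler, same return value.

-- ===== PORT A =====
-- inner `while i < len(data) and data[i] > threshold: i += 1`; the fuel argument
-- (always called with fuel ≥ data.length - i) only makes the loop total.
def aInner (data : List Int) (t : Int) : Nat → Nat → Nat
  | 0, i => i
  | fuel+1, i => if i < data.length ∧ data.getD i 0 > t then aInner data t fuel (i+1) else i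

-- outer while loop of A (fuel likewise only a totality guard)
def aOuter (data : List Int) (t : Int) : Nat → Nat → List Int → List Int
  | 0, _, spikes => spikes
  | fuel+1, i, spikes =>
    if i < data.length then
      if data.getD i 0 > t then
        let j := aInner data t (data.length - i) i
        let dur := j - i
        let spikes' :=
          if dur ≥ 1 then
            (if spikes.isEmpty || decide ((i : Int) - spikes.getLast?.getD 0 ≥ 2)
             then spikes ++ [(i : Int)] else spikes)
          else spikes
        aOuter data t fuel j spikes'
      else aOuter data t fuel (i+1) spikes
    else spikes

def find_spikes_adaptive_py (data : List Int) (threshold : Int) : List Int :=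
  aOuter data threshold data.length 0 []

-- ===== PORT B =====
def bLoop (data : List Int) (t : Int) (i : Nat) (prev : Bool) (spikes : List Int) : List Int :=
  match data with
  | [] => spikes
  | x :: xs =>
    let cur := decide (x > t)
    bLoop xs t (i+1) cur (if cur && !prev then spikes ++ [(i : Int)] else spikes)

def find_spikes_adaptive_py_alt (data : List Int) (threshold : Int) : List Int :=
  bLoop data threshold 0 false []

-- ===== PRECONDITION & SPEC =====
def Spec_find_spikes_adaptive_py (data : List Int) (threshold : Int) (out : List Int) : Prop := out = find_spikes_adaptive_py_alt data threshold
instance (data : List Int) (threshold : Int) (out : List Int) : Decidable (Spec_find_spikes_adaptive_py data threshold out) := by unfold Spec_find_spikes_adaptive_py; infer_instance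

-- ===== CLAIM (what is proved, stated in full; the proofs are below) =====
def Claim_equal_find_spikes_adaptive_py : Prop := ∀ (data : List Int) (threshold : Int), Dom_find_spikes_adaptive_py data threshold → Spec_find_spikes_adaptive_py data threshold (find_spikes_adaptive_py data threshold)

-- ===== LEMMAS AND PROOFS =====

theorem getD_at (data : List Int) (i : Nat) (hi : i < data.length) :
    data.getD i 0 = data[i] := by
  simp [List.getD_eq_getElem?_getD, List.getElem?_eq_getElem hi]

-- common reference: the list of run starts from position i onwards, given the prev flag
def runStarts (data : List Int) (t : Int) (i : Nat) (prev : Bool) : List Int :=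
  if i < data.length then
    let cur := decide (data.getD i 0 > t)
    (if cur && !prev then [((i : Int))] else []) ++ runStarts data t (i+1) cur
  else []
termination_by data.length - i
decreasing_by omega

theorem aInner_ge (data : List Int) (t : Int) :
    ∀ fuel i, i ≤ aInner data t fuel i := by
  intro fuel
  induction fuel with
  | zero => intro i; simp [aInner]
  | succ fuel ih =>
    intro i
    rw [aInner]
    split
    · have := ih (i+1); omega
    · exact le_refl i

theorem aInner_gt (data : List Int) (t : Int) (fuel i : Nat)
    (hfc : data.length - i ≤ fuel + 1)
    (h : i < data.length ∧ data.getD i 0 > t) :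
    i < aInner data t (fuel+1) i := by
  rw [aInner, if_pos h]
  have := aInner_ge data t fuel (i+1); omega

theorem aInner_stops (data : List Int) (t : Int) :
    ∀ fuel i, data.length - i ≤ fuel →
      ¬ (aInner data t fuel i < data.length ∧ data.getD (aInner data t fuel i) 0 > t) := by
  intro fuel
  induction fuel with
  | zero =>
    intro i hf
    rw [aInner]
    intro hc; omega
  | succ fuel ih =>
    intro i hf
    rw [aInner]
    split
    · exact ih (i+1) (by have := ‹i < data.length ∧ data.getD i 0 > t›.1; omega)
    · assumption

theorem runStarts_prev_irrel (data : List Int) (t : Int) (i : Nat)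
    (h : ¬ (i < data.length ∧ data.getD i 0 > t)) (b : Bool) :
    runStarts data t i b = runStarts data t i false := by
  by_cases hi : i < data.length
  · have hxp : ¬ t < data[i] := by
      rw [← getD_at data i hi]
      exact fun hl => h ⟨hi, hl⟩
    rw [runStarts, runStarts]
    simp [hi, hxp]
  · rw [runStarts, runStarts]
    simp [hi]

theorem runStarts_skip (data : List Int) (t : Int) :
    ∀ fuel i, data.length - i ≤ fuel →
      runStarts data t i true = runStarts data t (aInner data t fuel i) true := by
  intro fuel
  induction fuel with
  | zero =>
    intro i hf
    rw [aInner]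
  | succ fuel ih =>
    intro i hf
    by_cases h : i < data.length ∧ data.getD i 0 > t
    · rw [aInner, if_pos h]
      have htp : t < data[i] := by rw [← getD_at data i h.1]; exact h.2
      have step : runStarts data t i true = runStarts data t (i+1) true := by
        rw [runStarts, if_pos h.1]
        simp [h.1, htp]
      rw [step]
      exact ih (i+1) (by have := h.1; omega)
    · rw [aInner, if_neg h]

-- invariant carried by A's accumulator
def SpInv (data : List Int) (t : Int) (i : Nat) (spikes : List Int) : Prop :=
  spikes.getLast? = none ∨
  ∃ s, spikes.getLast? = some s ∧
    (s ≤ (i : Int) - 2 ∨ (s ≤ (i : Int) - 1 ∧ ¬ (i < data.length ∧ data.getD i 0 > t)))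

theorem aOuter_eq (data : List Int) (t : Int) :
    ∀ fuel i spikes, data.length - i ≤ fuel → SpInv data t i spikes →
      aOuter data t fuel i spikes = spikes ++ runStarts data t i false := by
  intro fuel
  induction fuel with
  | zero =>
    intro i spikes hn _
    have hi : ¬ i < data.length := by omega
    rw [aOuter, runStarts, if_neg hi, List.append_nil]
  | succ fuel ih =>
    intro i spikes hn hinv
    by_cases hi : i < data.length
    · by_cases ht : data.getD i 0 > t
      · -- spike branch
        have hm : data.length - i = (data.length - i - 1) + 1 := by omega
        set m := data.length - i - 1 with hmdef
        have hgt : i < aInner data t (data.length - i) i := by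
          rw [hm]; exact aInner_gt data t m i (by omega) ⟨hi, ht⟩
        set j := aInner data t (data.length - i) i with hj
        have hstop : ¬ (j < data.length ∧ data.getD j 0 > t) := by
          rw [hj]; exact aInner_stops data t (data.length - i) i (by omega)
        have hdur : j - i ≥ 1 := by omega
        have hok : (spikes.isEmpty || decide ((i : Int) - spikes.getLast?.getD 0 ≥ 2)) = true := by
          rcases hinv with hnone | ⟨s, hs, hcase⟩
          · simp [List.getLast?_eq_none_iff.mp hnone]
          · rcases hcase with hle | ⟨_, habs⟩
            · simp only [hs, Option.getD_some, Bool.or_eq_true, decide_eq_true_eq]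
              right; omega
            · exact absurd ⟨hi, ht⟩ habs
        rw [aOuter, if_pos hi, if_pos ht]
        simp only [← hj, if_pos hdur, hok, if_true]
        have hinv' : SpInv data t j (spikes ++ [(i : Int)]) := by
          right
          refine ⟨(i : Int), by simp, ?_⟩
          right
          exact ⟨by omega, hstop⟩
        have hrec := ih j (spikes ++ [(i : Int)]) (by omega) hinv'
        rw [hrec]
        have htp : t < data[i] := by rw [← getD_at data i hi]; exact ht
        have hR : runStarts data t i false = (i : Int) :: runStarts data t (i+1) true := by
          rw [runStarts, if_pos hi]
          simp [hi, htp]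
        have hj1 : aInner data t m (i+1) = j := by
          rw [hj, hm, aInner, if_pos ⟨hi, ht⟩]
        rw [hR, runStarts_skip data t m (i+1) (by omega), hj1,
          runStarts_prev_irrel data t j hstop true]
        simp
      · -- below threshold
        rw [aOuter, if_pos hi, if_neg ht]
        have hinv' : SpInv data t (i+1) spikes := by
          rcases hinv with hnone | ⟨s, hs, hcase⟩
          · exact Or.inl hnone
          · refine Or.inr ⟨s, hs, Or.inl ?_⟩
            rcases hcase with h1 | h2
            · push_cast at h1 ⊢; omega
            · have := h2.1; push_cast at this ⊢; omega
        rw [ih (i+1) spikes (by omega) hinv']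
        have hxp : ¬ t < data[i] := by rw [← getD_at data i hi]; exact ht
        have : runStarts data t i false = runStarts data t (i+1) false := by
          rw [runStarts, if_pos hi]
          simp [hi, hxp]
        rw [this]
    · rw [aOuter, if_neg hi, runStarts, if_neg hi, List.append_nil]

theorem bLoop_eq (data : List Int) (t : Int) :
    ∀ xs i prev spikes, data.drop i = xs →
      bLoop xs t i prev spikes = spikes ++ runStarts data t i prev := by
  intro xs
  induction xs with
  | nil =>
    intro i prev spikes hdrop
    have hi : ¬ i < data.length := by
      intro h
      have := List.drop_eq_nil_iff.mp hdrop; omega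
    rw [bLoop, runStarts, if_neg hi, List.append_nil]
  | cons x xs ih =>
    intro i prev spikes hdrop
    have hi : i < data.length := by
      by_contra h
      rw [List.drop_eq_nil_of_le (by omega)] at hdrop
      simp at hdrop
    have h1 : data.drop i = data[i] :: data.drop (i+1) := List.drop_eq_getElem_cons hi
    rw [h1] at hdrop
    injection hdrop with hx1 hdrop'
    have hx : data.getD i 0 = x := by rw [getD_at data i hi]; exact hx1
    rw [bLoop, runStarts, if_pos hi]
    simp only [hx]
    rw [ih (i+1) (decide (x > t)) _ hdrop']
    cases hcb : (decide (x > t) && !prev) <;> simp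

-- ===== VERDICT (by name: the statement is the Claim_ definition above) =====
theorem find_spikes_adaptive_py_spec : Claim_equal_find_spikes_adaptive_py := by
  intro data threshold _
  unfold Spec_find_spikes_adaptive_py find_spikes_adaptive_py find_spikes_adaptive_py_alt
  rw [bLoop_eq data threshold data 0 false [] (by simp),
    aOuter_eq data threshold data.length 0 [] (by omega) (Or.inl rfl)]
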